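-- pv_equiv track=rewrite | github.com/fcavalcantirj/open-data-gov | cli4/populators/financial/records_populator.py | _calculate_campaign_years
-- ===== SOURCE A (Python) =====
-- from typing import Dict, List, Optional
--
-- def _calculate_campaign_years(start_year: int, end_year: int) -> List[int]:
--     """
--     Calculate campaign finance years from service period
--
--     Brazilian elections happen every 4 years: 2014, 2018, 2022, 2026...
--     Campaign finance data includes:
--     - Election year itself
--     - Year before election (pre-campaign period)
--     """
--     campaign_years = set()
--
--     # Find all election years within and around the period
--     # Start from the first election year that could affect this period
--     first_election_year = ((start_year - 1) // 4) * 4 + 2  # 2014, 2018, 2022...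
--
--     election_year = first_election_year
--     while election_year <= end_year + 4:  # Look ahead for post-service campaigns
--         # Add election year if it's relevant
--         if election_year >= start_year - 1 and election_year <= end_year + 1:
--             campaign_years.add(election_year)
--
--         # Add pre-campaign year (year before election)
--         pre_campaign_year = election_year - 1
--         if pre_campaign_year >= start_year - 1 and pre_campaign_year <= end_year + 1:
--             campaign_years.add(pre_campaign_year)
--
--         election_year += 4
--
--     return sorted(list(campaign_years))
-- ===== SOURCE B (Python) =====
-- from typing import List
--
-- def _calculate_campaign_years(start_year: int, end_year: int) -> List[int]:
--     """Relevant campaign-finance years: every year y in [start_year-1, end_year+1]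
--     whose remainder mod 4 is 1 or 2 (election years are == 2 mod 4, pre-campaign years == 1).
--     One flat unit-step scan, already in increasing order."""
--     years = []
--     for y in range(start_year - 1, end_year + 2):
--         if y % 4 == 1 or y % 4 == 2:
--             years.append(y)
--     return years
-- ===== Notes on version B (the rewrite author's own statement) =====
-- stated objective: simpler
-- what changed: Replaces A's step-by-4 while loop over election years with two per-iteration offset checks plus a set and a final sort by a single unit-step scan of the inclusive span from start_year-1 to end_year+1 appending years whose remainder mod 4 is 1 or 2, which is already sorted and duplicate-free.
import Mathlib
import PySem

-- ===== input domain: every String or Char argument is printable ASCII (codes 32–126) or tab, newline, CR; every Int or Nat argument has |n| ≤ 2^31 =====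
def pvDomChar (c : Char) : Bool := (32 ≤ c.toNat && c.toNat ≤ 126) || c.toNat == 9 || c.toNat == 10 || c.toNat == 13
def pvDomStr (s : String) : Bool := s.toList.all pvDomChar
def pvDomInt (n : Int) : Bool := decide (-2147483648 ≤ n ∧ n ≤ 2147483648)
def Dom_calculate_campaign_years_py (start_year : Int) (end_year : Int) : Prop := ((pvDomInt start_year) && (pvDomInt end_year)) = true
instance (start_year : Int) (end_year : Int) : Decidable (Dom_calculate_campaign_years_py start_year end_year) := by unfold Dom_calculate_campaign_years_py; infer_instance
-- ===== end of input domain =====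

-- B replaces A's step-by-4 election loop (set + final sort) by one unit-step scan
-- appending years with y % 4 in (1, 2); objective: simpler.

-- ===== PORT A =====
-- A's while loop: election_year steps by 4 while ≤ end_year + 4, adding the election
-- year and its pre-campaign year to the set when inside [start_year-1, end_year+1]
def pvALoop (start_year end_year election_year : Int) (acc : PySem.Set Int) : PySem.Set Int :=
  if election_year ≤ end_year + 4 then
    let acc1 := if election_year ≥ start_year - 1 ∧ election_year ≤ end_year + 1 then
                  PySem.Set.add acc election_year else acc
    let pre_campaign_year := election_year - 1
    let acc2 := if pre_campaign_year ≥ start_year - 1 ∧ pre_campaign_year ≤ end_year + 1 then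
                  PySem.Set.add acc1 pre_campaign_year else acc1
    pvALoop start_year end_year (election_year + 4) acc2
  else acc
termination_by (end_year + 8 - election_year).toNat
decreasing_by omega

def calculate_campaign_years_py (start_year : Int) (end_year : Int) : List Int :=
  let first_election_year := (PySem.Int.floordiv (start_year - 1) 4) * 4 + 2
  PySem.List.sorted (pvALoop start_year end_year first_election_year PySem.Set.empty) (fun x => x) false

-- ===== PORT B =====
def calculate_campaign_years_py_alt (start_year : Int) (end_year : Int) : List Int :=
  (PySem.List.pyRange (start_year - 1) (end_year + 2) 1).foldl
    (fun years y => if PySem.Int.mod y 4 == 1 || PySem.Int.mod y 4 == 2 then years ++ [y] else years) []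

-- ===== PRECONDITION & SPEC =====
def Spec_calculate_campaign_years_py (start_year : Int) (end_year : Int) (out : List Int) : Prop := out = calculate_campaign_years_py_alt start_year end_year
instance (start_year : Int) (end_year : Int) (out : List Int) : Decidable (Spec_calculate_campaign_years_py start_year end_year out) := by unfold Spec_calculate_campaign_years_py; infer_instance

-- ===== CLAIM (what is proved, stated in full; the proofs are below) =====
def Claim_equal_calculate_campaign_years_py : Prop := ∀ (start_year : Int) (end_year : Int), Dom_calculate_campaign_years_py start_year end_year → Spec_calculate_campaign_years_py start_year end_year (calculate_campaign_years_py start_year end_year)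

-- ===== LEMMAS AND PROOFS =====

lemma nodup_pvALoop (s e c : Int) (acc : PySem.Set Int) (h : acc.Nodup) :
    (pvALoop s e c acc).Nodup := by
  induction c, acc using pvALoop.induct s e with
  | case1 c acc hle acc1 pre acc2 ih =>
    rw [pvALoop, if_pos hle]
    exact ih (by simp only [acc2, acc1]; split <;> split <;> simp_all [PySem.Set.nodup_add])
  | case2 c acc hgt => rw [pvALoop, if_neg hgt]; exact h

-- characterisation of A's loop: the set it returns holds exactly the years of
-- [s-1, e+1] that are ≡ 2 (election, from c up) or ≡ 1 (pre-campaign, from c-1 up) mod 4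
lemma mem_pvALoop (s e : Int) (c : Int) (acc : PySem.Set Int) :
    ∀ y : Int, c % 4 = 2 →
      (y ∈ pvALoop s e c acc ↔
        y ∈ acc ∨ (s - 1 ≤ y ∧ y ≤ e + 1 ∧
          ((y % 4 = 2 ∧ c ≤ y) ∨ (y % 4 = 1 ∧ c - 1 ≤ y)))) := by
  induction c, acc using pvALoop.induct s e with
  | case1 c acc hle acc1 pre acc2 ih =>
    intro y hc
    rw [pvALoop, if_pos hle]
    show y ∈ pvALoop s e (c + 4) acc2 ↔ _
    rw [ih y (by omega)]
    have hacc2 : y ∈ acc2 ↔ y ∈ acc ∨ (c ≥ s-1 ∧ c ≤ e+1 ∧ y = c) ∨ (c-1 ≥ s-1 ∧ c-1 ≤ e+1 ∧ y = c-1) := by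
      simp only [acc2, acc1, pre]
      split <;> split <;> simp_all [PySem.Set.mem_add] <;>
        (by_cases hy : y ∈ acc <;> simp [hy] <;> omega)
    rw [hacc2]
    by_cases hy : y ∈ acc <;> simp only [hy, true_or, false_or]; omega
  | case2 c acc hgt =>
    intro y hc
    rw [pvALoop, if_neg hgt]
    constructor
    · exact Or.inl
    · rintro (h | h)
      · exact h
      · omega

-- ===== VERDICT (by name: the statement is the Claim_ definition above) =====
theorem calculate_campaign_years_py_spec : Claim_equal_calculate_campaign_years_py := by
  intro s e _hdom
  unfold Spec_calculate_campaign_years_py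
  unfold calculate_campaign_years_py calculate_campaign_years_py_alt
  have h4 : (0:Int) < 4 := by norm_num
  rw [PySem.Int.floordiv_eq_ediv_of_pos h4]
  set f : Int := (s - 1) / 4 * 4 + 2 with hf
  have hfmod : f % 4 = 2 := by omega
  set p : Int → Bool := fun y => PySem.Int.mod y 4 == 1 || PySem.Int.mod y 4 == 2 with hp
  rw [PySem.List.foldl_append_if_eq_filter p]
  simp only [List.nil_append]
  apply PySem.List.sorted_eq_of_perm_of_pairwise_lt
  · -- permutation: both sides are duplicate-free and have the same members
    rw [List.perm_ext_iff_of_nodup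
      ((PySem.List.pairwise_lt_pyRange_one (s-1) (e+2)).nodup.filter p)
      (nodup_pvALoop s e f PySem.Set.empty (by simp [PySem.Set.empty]))]
    intro a
    rw [List.mem_filter, PySem.List.mem_pyRange_one,
      mem_pvALoop s e f PySem.Set.empty a hfmod]
    have hpa : p a = true ↔ (a % 4 = 1 ∨ a % 4 = 2) := by
      simp [hp]
    rw [hpa]
    simp only [PySem.Set.empty, List.not_mem_nil, false_or]
    omega
  · exact (PySem.List.pairwise_lt_pyRange_one (s-1) (e+2)).filter p
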